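-- pv_equiv track=rewrite | github.com/alkurd/repo | lp/Module-2/Deel_1/5/robotARM_6.py | switch_boolean
-- ===== SOURCE A (Python) =====
-- def switch_boolean(lst):
--     result = []
--     switch = True
--     for item in lst:
--         if item == 'flick':
--             switch = not switch
--         result.append(switch)
--     return result
-- ===== SOURCE B (Python) =====
-- def switch_boolean(lst):
--     # divide-and-negate: everything before the first 'flick' is True, the
--     # flick itself emits False, and the remainder is the pointwise negation
--     # of the same problem solved independently on the tail.
--     if 'flick' not in lst:
--         return [True] * len(lst)
--     i = lst.index('flick')
--     return [True] * i + [False] + [not v for v in switch_boolean(lst[i + 1:])]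
-- ===== Notes on version B (the rewrite author's own statement) =====
-- stated objective: alternative
-- what changed: Replaces the stateful toggling loop by a divide-and-negate recursion: split at the first 'flick', emit a constant True block and False, and negate the recursive solution of the tail (no running switch state).
import Mathlib
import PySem

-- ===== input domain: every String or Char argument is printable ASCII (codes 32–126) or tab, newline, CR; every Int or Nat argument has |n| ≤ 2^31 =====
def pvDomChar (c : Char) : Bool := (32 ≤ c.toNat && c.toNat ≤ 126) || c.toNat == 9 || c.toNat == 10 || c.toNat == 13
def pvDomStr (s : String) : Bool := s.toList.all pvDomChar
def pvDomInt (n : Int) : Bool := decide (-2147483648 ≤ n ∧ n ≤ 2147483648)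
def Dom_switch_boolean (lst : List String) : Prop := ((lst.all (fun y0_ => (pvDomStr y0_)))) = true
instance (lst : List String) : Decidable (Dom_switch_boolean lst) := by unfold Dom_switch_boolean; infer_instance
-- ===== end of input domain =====

-- B replaces A's stateful toggling loop by a divide-and-negate recursion at the first 'flick'; alternative structure, same results.

-- ===== PORT A =====
-- single loop carrying the toggled switch and the result list
def switch_boolean (lst : List String) : List Bool :=
  (lst.foldl
    (fun (st : List Bool × Bool) item =>
      let sw := if item == "flick" then !st.2 else st.2
      (st.1 ++ [sw], sw))
    ([], true)).1

-- ===== PORT B =====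
-- "'flick' not in lst" and "lst.index('flick')" are the two arms of PySem.List.index?;
-- lst[i+1:] is PySem.List.slice (some (i+1)) none; "[not v for v in …]" is the map.
def switch_boolean_alt (lst : List String) : List Bool :=
  match h : PySem.List.index? lst "flick" with
  | none => List.replicate lst.length true
  | some i =>
      List.replicate i true ++ [false] ++
        (switch_boolean_alt (PySem.List.slice lst (some ((i : Int) + 1)) none)).map (fun v => !v)
termination_by lst.length
decreasing_by
  obtain ⟨pre, suf, hls, hlen, _⟩ := (PySem.List.index?_eq_some_iff _ _ _).mp h
  have : PySem.List.slice lst (some ((i : Int) + 1)) none = lst.drop (i + 1) := by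
    have := PySem.List.slice_from_natCast (xs := lst) (a := i + 1)
    simpa using this
  rw [this]
  have : i < lst.length := by subst hls; simp [← hlen]
  simp [List.length_drop]; omega

-- ===== PRECONDITION & SPEC =====
def Spec_switch_boolean (lst : List String) (out : List Bool) : Prop := out = switch_boolean_alt lst
instance (lst : List String) (out : List Bool) : Decidable (Spec_switch_boolean lst out) := by unfold Spec_switch_boolean; infer_instance

-- ===== CLAIM (what is proved, stated in full; the proofs are below) =====
def Claim_equal_switch_boolean : Prop := ∀ (lst : List String), Dom_switch_boolean lst → Spec_switch_boolean lst (switch_boolean lst)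

-- ===== LEMMAS AND PROOFS =====

-- reference run: the toggled-state trace starting from b (proof-only helper)
def sbRun (lst : List String) (b : Bool) : List Bool :=
  match lst with
  | [] => []
  | x :: xs =>
      let b' := if x == "flick" then !b else b
      b' :: sbRun xs b'

-- A's fold accumulates exactly the trace
theorem sbA_eq_run (lst : List String) (acc : List Bool) (b : Bool) :
    (lst.foldl
      (fun (st : List Bool × Bool) item =>
        let sw := if item == "flick" then !st.2 else st.2
        (st.1 ++ [sw], sw))
      (acc, b)).1 = acc ++ sbRun lst b := by
  induction lst generalizing acc b with
  | nil => simp [sbRun]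
  | cons x xs ih =>
    simp only [List.foldl_cons, sbRun]
    rw [ih]
    simp

-- flipping the start state negates the whole trace
theorem sbRun_not (lst : List String) (b : Bool) :
    sbRun lst (!b) = (sbRun lst b).map (fun v => !v) := by
  induction lst generalizing b with
  | nil => simp [sbRun]
  | cons x xs ih =>
    by_cases hx : x == "flick" <;>
      simp [sbRun, hx, ih, Function.comp_def, Bool.not_not]

-- a flick-free prefix leaves the state alone and emits a constant block
theorem sbRun_append_no_flick (pre rest : List String) (b : Bool)
    (hp : "flick" ∉ pre) :
    sbRun (pre ++ rest) b = List.replicate pre.length b ++ sbRun rest b := by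
  induction pre with
  | nil => simp
  | cons x xs ih =>
    simp only [List.mem_cons, not_or] at hp
    have hx : (x == "flick") = false := by
      simp only [beq_eq_false_iff_ne, ne_eq]
      exact fun h => hp.1 h.symm
    simp only [List.cons_append, sbRun, hx, Bool.false_eq_true, if_false,
      List.length_cons, List.replicate_succ, List.cons_append]
    exact congrArg _ (ih hp.2)

-- B computes the trace from the start state true
theorem sbAlt_eq_run (lst : List String) : switch_boolean_alt lst = sbRun lst true := by
  induction hn : lst.length using Nat.strong_induction_on generalizing lst with
  | _ n ih =>
  rw [switch_boolean_alt]
  split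
  next h =>
    have hnot : "flick" ∉ lst := (PySem.List.index?_eq_none_iff _ _).mp h
    have := sbRun_append_no_flick lst [] true hnot
    simpa [sbRun] using this.symm
  next i h =>
    obtain ⟨pre, suf, hls, hlen, hpre⟩ := (PySem.List.index?_eq_some_iff _ _ _).mp h
    have hslice : PySem.List.slice lst (some ((i : Int) + 1)) none = suf := by
      have heq := PySem.List.slice_from_natCast (xs := lst) (a := i + 1)
      have : lst.drop (i + 1) = suf := by
        subst hls hlen; simp [List.drop_append]
      simpa [this] using heq
    have hsuflen : suf.length < n := by
      subst hls hn; simp; omega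
    rw [hslice, ih suf.length hsuflen suf rfl]
    subst hls
    rw [sbRun_append_no_flick pre ("flick" :: suf) true hpre, hlen]
    have hss : sbRun ("flick" :: suf) true = false :: (sbRun suf true).map (fun v => !v) := by
      have h2 := sbRun_not suf true
      simp only [Bool.not_true] at h2
      simp [sbRun, h2]
    simp [hss]

-- ===== VERDICT (by name: the statement is the Claim_ definition above) =====
theorem switch_boolean_spec : Claim_equal_switch_boolean := by
  intro lst _
  unfold Spec_switch_boolean switch_boolean
  rw [sbA_eq_run, sbAlt_eq_run]
  simp
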